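-- pv_equiv track=rewrite | github.com/YkKostiantyn/KZPLab | lab7/JaggedMatrix.py | gen_jagged_matrix
-- ===== SOURCE A (Python) =====
-- def gen_jagged_matrix(size: int, fill_char: str) -> list[list[str]]:
--     """
--     The function generates a square matrix of size x size
--     with shaded areas in the shape of "teeth".
--     :param size: square matrix size
--     :param fill_char: placeholder symbol for "shaded" areas
--     :return: matrix in the form of a list of lists
--     """
--     matrix = []
--
--     for i in range(size):
--         row = []
--         for j in range(size):
--             if j >= (size - i - 1):
--                 row.append(fill_char)
--             else:
--                 row.append(" ")
--         matrix.append(row)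
--     return matrix
-- ===== SOURCE B (Python) =====
-- def gen_jagged_matrix(size: int, fill_char: str) -> list[list[str]]:
--     return [[" "] * (size - i - 1) + [fill_char] * (i + 1) for i in range(size)]
-- ===== Notes on version B (the rewrite author's own statement) =====
-- stated objective: simpler
-- what changed: Replaces the per-cell inner loop with a per-row membership test by a closed-form split: each row is built directly as (size-i-1) spaces followed by (i+1) fill characters via list multiplication, in a single comprehension.
import Mathlib
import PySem

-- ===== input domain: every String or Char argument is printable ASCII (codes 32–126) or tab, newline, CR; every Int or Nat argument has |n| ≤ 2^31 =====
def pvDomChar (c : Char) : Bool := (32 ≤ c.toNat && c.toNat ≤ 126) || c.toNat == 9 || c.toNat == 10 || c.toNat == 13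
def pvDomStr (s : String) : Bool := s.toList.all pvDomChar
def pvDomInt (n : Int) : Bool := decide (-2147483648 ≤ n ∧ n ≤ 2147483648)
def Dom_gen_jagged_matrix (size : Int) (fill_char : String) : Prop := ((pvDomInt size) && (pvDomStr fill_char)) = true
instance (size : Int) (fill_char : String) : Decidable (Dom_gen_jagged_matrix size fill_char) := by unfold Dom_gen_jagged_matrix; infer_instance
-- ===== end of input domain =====

-- B replaces A's per-cell membership test with a closed-form split of each row into a
-- space block and a fill block (simpler decomposition; same asymptotic cost).

-- ===== PORT A =====
-- literal transliteration: outer loop appends rows, inner loop appends one cell per column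
def gen_jagged_matrix (size : Int) (fill_char : String) : List (List String) :=
  (PySem.List.pyRange 0 size 1).foldl
    (fun matrix i =>
      matrix ++
        [(PySem.List.pyRange 0 size 1).foldl
          (fun row j => if size - i - 1 ≤ j then row ++ [fill_char] else row ++ [" "]) []])
    []

-- ===== PORT B =====
-- literal transliteration of Source B: one comprehension, each row built from two replicated blocks
def gen_jagged_matrix_alt (size : Int) (fill_char : String) : List (List String) :=
  (PySem.List.pyRange 0 size 1).map
    (fun i => List.replicate (size - i - 1).toNat " " ++ List.replicate (i + 1).toNat fill_char)

-- ===== PRECONDITION & SPEC =====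
def Spec_gen_jagged_matrix (size : Int) (fill_char : String) (out : List (List String)) : Prop := out = gen_jagged_matrix_alt size fill_char
instance (size : Int) (fill_char : String) (out : List (List String)) : Decidable (Spec_gen_jagged_matrix size fill_char out) := by unfold Spec_gen_jagged_matrix; infer_instance

-- ===== CLAIM (what is proved, stated in full; the proofs are below) =====
def Claim_equal_gen_jagged_matrix : Prop := ∀ (size : Int) (fill_char : String), Dom_gen_jagged_matrix size fill_char → Spec_gen_jagged_matrix size fill_char (gen_jagged_matrix size fill_char)

-- ===== LEMMAS AND PROOFS =====

-- A's inner loop on a range whose elements are all below the threshold produces only spaces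
theorem foldl_cells_lt (fill : String) (t : Int) :
    ∀ (l : List Int) (acc : List String), (∀ j ∈ l, j < t) →
      l.foldl (fun row j => if t ≤ j then row ++ [fill] else row ++ [" "]) acc
        = acc ++ List.replicate l.length " " := by
  intro l
  induction l with
  | nil => intro acc _; simp
  | cons x xs ih =>
    intro acc h
    have hx : x < t := h x (by simp)
    simp only [List.foldl_cons, if_neg (not_le.mpr hx)]
    rw [ih _ (fun j hj => h j (by simp [hj]))]
    simp [List.replicate_succ]

-- A's inner loop on a range whose elements all reach the threshold produces only fill cells
theorem foldl_cells_ge (fill : String) (t : Int) :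
    ∀ (l : List Int) (acc : List String), (∀ j ∈ l, t ≤ j) →
      l.foldl (fun row j => if t ≤ j then row ++ [fill] else row ++ [" "]) acc
        = acc ++ List.replicate l.length fill := by
  intro l
  induction l with
  | nil => intro acc _; simp
  | cons x xs ih =>
    intro acc h
    have hx : t ≤ x := h x (by simp)
    simp only [List.foldl_cons, if_pos hx]
    rw [ih _ (fun j hj => h j (by simp [hj]))]
    simp [List.replicate_succ]

-- for each 0 ≤ i < size, A's inner loop builds exactly B's two-block row
theorem row_eq (size i : Int) (fill : String) (h0 : 0 ≤ i) (hi : i < size) :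
    (PySem.List.pyRange 0 size 1).foldl
      (fun row j => if size - i - 1 ≤ j then row ++ [fill] else row ++ [" "]) []
      = List.replicate (size - i - 1).toNat " " ++ List.replicate (i + 1).toNat fill := by
  have ht0 : (0:Int) ≤ size - i - 1 := by omega
  have hts : size - i - 1 ≤ size := by omega
  rw [PySem.List.pyRange_one_append 0 (size - i - 1) size ht0 hts, List.foldl_append]
  rw [foldl_cells_lt fill (size - i - 1) _ []
      (fun j hj => (PySem.List.mem_pyRange_one.mp hj).2)]
  rw [foldl_cells_ge fill (size - i - 1) _ _
      (fun j hj => (PySem.List.mem_pyRange_one.mp hj).1)]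
  simp [PySem.List.length_pyRange_one]
  congr 1
  omega

-- ===== VERDICT (by name: the statement is the Claim_ definition above) =====
theorem gen_jagged_matrix_spec : Claim_equal_gen_jagged_matrix := by
  intro size fill_char _
  unfold Spec_gen_jagged_matrix gen_jagged_matrix gen_jagged_matrix_alt
  rw [PySem.List.foldl_append_singleton_eq_map]
  simp only [List.nil_append]
  apply List.map_congr_left
  intro i hi
  obtain ⟨h0, h1⟩ := PySem.List.mem_pyRange_one.mp hi
  exact row_eq size i fill_char h0 h1
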